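-- pv_equiv track=rewrite | github.com/PremKR2505/Secure-password-generator-python-pwd-project | main.py | build_charset
-- ===== SOURCE A (Python) =====
-- import string, random
--
-- AMBI=set('Il1Lo0O')
--
-- def build_charset(include_lower, include_upper,include_digits,include_symbols,custom_symbols,exclude_AMBI,):
--     parts=[]
--     if include_lower:
--         parts.append(string.ascii_lowercase)
--     if include_upper:
--         parts.append(string.ascii_uppercase)
--     if include_digits:
--         parts.append(string.digits)
--     if include_symbols:
--         parts.append(string.punctuation)
--     if custom_symbols:
--         parts.append(custom_symbols)
--     pool = "".join(parts) or ""  # ensures that it returns string even if it may be empty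
--     if exclude_AMBI:
--         pool = "".join(ch for ch in pool if ch not in AMBI)
--     # remove duplicates while preserving order
--     return ''.join(dict.fromkeys(pool))  # preserves original order
-- ===== SOURCE B (Python) =====
-- import string
--
-- AMBI = set('Il1Lo0O')
-- # ambiguity-filtered variants of the standard alphabets, precomputed once;
-- # punctuation contains no ambiguous characters
-- _LOWER = (string.ascii_lowercase, 'abcdefghijkmnpqrstuvwxyz')
-- _UPPER = (string.ascii_uppercase, 'ABCDEFGHJKMNPQRSTUVWXYZ')
-- _DIGITS = (string.digits, '23456789')
--
-- def build_charset(include_lower, include_upper, include_digits, include_symbols, custom_symbols, exclude_AMBI):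
--     # The standard alphabets are duplicate-free and pairwise disjoint, so their
--     # concatenation needs no filtering or dedup at run time: just select the
--     # right precomputed table. Only the custom tail needs a membership check.
--     i = 1 if exclude_AMBI else 0
--     out = ((_LOWER[i] if include_lower else '')
--            + (_UPPER[i] if include_upper else '')
--            + (_DIGITS[i] if include_digits else '')
--            + (string.punctuation if include_symbols else ''))
--     for ch in custom_symbols:
--         if ch not in out and not (exclude_AMBI and ch in AMBI):
--             out += ch
--     return out
-- ===== Notes on version B (the rewrite author's own statement) =====
-- stated objective: alternative
-- what changed: A concatenates the raw source alphabets and then runs a whole-pool ambiguity-filter pass plus a whole-pool dict.fromkeys dedup pass; B does neither over the bulk: it selects precomputed (raw or ambiguity-filtered) constant tables for the standard alphabets, whose concatenation is duplicate-free by disjointness, and only appends custom-tail characters after a membership check.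
import Mathlib
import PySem

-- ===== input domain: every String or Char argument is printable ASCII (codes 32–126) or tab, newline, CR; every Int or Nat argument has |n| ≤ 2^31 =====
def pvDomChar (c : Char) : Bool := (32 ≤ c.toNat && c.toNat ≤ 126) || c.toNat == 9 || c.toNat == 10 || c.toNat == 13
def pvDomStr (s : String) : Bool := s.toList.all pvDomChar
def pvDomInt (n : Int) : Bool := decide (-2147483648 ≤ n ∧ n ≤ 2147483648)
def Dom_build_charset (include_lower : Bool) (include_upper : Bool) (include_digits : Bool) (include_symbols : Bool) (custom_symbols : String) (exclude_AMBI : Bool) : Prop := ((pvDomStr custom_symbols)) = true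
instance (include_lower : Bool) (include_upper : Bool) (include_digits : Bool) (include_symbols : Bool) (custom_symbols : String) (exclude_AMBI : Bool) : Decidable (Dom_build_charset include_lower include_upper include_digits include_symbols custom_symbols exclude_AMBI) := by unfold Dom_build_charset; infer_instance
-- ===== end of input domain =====

-- B replaces A's whole-pool filter pass and whole-pool dedup pass by precomputed
-- (raw or ambiguity-filtered) constant tables — the standard alphabets are disjoint and
-- duplicate-free, so only custom-tail characters need a membership check; objective: alternative.

-- module-level constants shared by both Pythons (string.ascii_lowercase etc., AMBI)
def pvAMBI : PySem.Set Char := PySem.Set.ofList "Il1Lo0O".toList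
def pvLower : List Char := "abcdefghijklmnopqrstuvwxyz".toList
def pvUpper : List Char := "ABCDEFGHIJKLMNOPQRSTUVWXYZ".toList
def pvDigits : List Char := "0123456789".toList
def pvPunct : List Char := "!\"#$%&'()*+,-./:;<=>?@[\\]^_`{|}~".toList

-- ===== PORT A =====
def build_charset (include_lower : Bool) (include_upper : Bool) (include_digits : Bool) (include_symbols : Bool) (custom_symbols : String) (exclude_AMBI : Bool) : String :=
  let parts : List (List Char) := []
  let parts := if include_lower then parts ++ [pvLower] else parts
  let parts := if include_upper then parts ++ [pvUpper] else parts
  let parts := if include_digits then parts ++ [pvDigits] else parts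
  let parts := if include_symbols then parts ++ [pvPunct] else parts
  let parts := if custom_symbols ≠ "" then parts ++ [custom_symbols.toList] else parts
  -- pool = "".join(parts) or ""  ('or ""' is the identity: join already returns a string)
  let pool : List Char := parts.flatten
  let pool := if exclude_AMBI then pool.filter (fun ch => !(PySem.Set.contains pvAMBI ch)) else pool
  -- ''.join(dict.fromkeys(pool))
  String.mk (PySem.List.dedup pool)

-- ===== PORT B =====
-- Source B's precomputed module-level tables: (raw alphabet, ambiguity-filtered alphabet)
def pvLowerTab : List Char × List Char := (pvLower, "abcdefghijkmnpqrstuvwxyz".toList)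
def pvUpperTab : List Char × List Char := (pvUpper, "ABCDEFGHJKMNPQRSTUVWXYZ".toList)
def pvDigitsTab : List Char × List Char := (pvDigits, "23456789".toList)

-- body of Source B's loop over the custom tail: append ch unless already present or excluded
def pvTailStep (exclude_AMBI : Bool) (out : List Char) (ch : Char) : List Char :=
  if !(out.contains ch) && !(exclude_AMBI && PySem.Set.contains pvAMBI ch) then out ++ [ch] else out

def build_charset_alt (include_lower : Bool) (include_upper : Bool) (include_digits : Bool) (include_symbols : Bool) (custom_symbols : String) (exclude_AMBI : Bool) : String :=
  -- i = 1 if exclude_AMBI else 0; table selection ported as `if exclude_AMBI then .2 else .1`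
  let out : List Char :=
    (if include_lower then (if exclude_AMBI then pvLowerTab.2 else pvLowerTab.1) else [])
    ++ (if include_upper then (if exclude_AMBI then pvUpperTab.2 else pvUpperTab.1) else [])
    ++ (if include_digits then (if exclude_AMBI then pvDigitsTab.2 else pvDigitsTab.1) else [])
    ++ (if include_symbols then pvPunct else [])
  let out := custom_symbols.toList.foldl (pvTailStep exclude_AMBI) out
  String.mk out

-- ===== PRECONDITION & SPEC =====
def Spec_build_charset (include_lower : Bool) (include_upper : Bool) (include_digits : Bool) (include_symbols : Bool) (custom_symbols : String) (exclude_AMBI : Bool) (out : String) : Prop := out = build_charset_alt include_lower include_upper include_digits include_symbols custom_symbols exclude_AMBI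
instance (include_lower : Bool) (include_upper : Bool) (include_digits : Bool) (include_symbols : Bool) (custom_symbols : String) (exclude_AMBI : Bool) (out : String) : Decidable (Spec_build_charset include_lower include_upper include_digits include_symbols custom_symbols exclude_AMBI out) := by unfold Spec_build_charset; infer_instance

-- ===== CLAIM =====
def Claim_equal_build_charset : Prop := ∀ (include_lower : Bool) (include_upper : Bool) (include_digits : Bool) (include_symbols : Bool) (custom_symbols : String) (exclude_AMBI : Bool), Dom_build_charset include_lower include_upper include_digits include_symbols custom_symbols exclude_AMBI → Spec_build_charset include_lower include_upper include_digits include_symbols custom_symbols exclude_AMBI (build_charset include_lower include_upper include_digits include_symbols custom_symbols exclude_AMBI)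

-- ===== LEMMAS AND PROOFS =====

-- proof-only abbreviations
def pvBase (il iu idg isym : Bool) : List Char :=
  (if il then pvLower else []) ++ (if iu then pvUpper else [])
  ++ (if idg then pvDigits else []) ++ (if isym then pvPunct else [])

def pvSafe (il iu idg isym : Bool) : List Char :=
  (if il then pvLowerTab.2 else []) ++ (if iu then pvUpperTab.2 else [])
  ++ (if idg then pvDigitsTab.2 else []) ++ (if isym then pvPunct else [])

-- B's custom-tail loop = Set.add folded over the ambiguity-filtered tail
theorem pv_tail_fold (ex : Bool) (l : List Char) : ∀ out : List Char,
    l.foldl (pvTailStep ex) out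
      = (l.filter (fun c => !(ex && PySem.Set.contains pvAMBI c))).foldl PySem.Set.add out := by
  induction l with
  | nil => intro out; rfl
  | cons c t ih =>
    intro out
    by_cases hm : c ∈ pvAMBI <;> by_cases hc : c ∈ out <;> cases ex <;>
      simp [pvTailStep, PySem.Set.add_eq_ite, hm, hc, ih]

-- folding Set.add over a duplicate-free list disjoint from the accumulator appends it
theorem pv_foldl_add_nodup : ∀ (l s : List Char), l.Nodup → (∀ c ∈ l, c ∉ s) →
    l.foldl PySem.Set.add s = s ++ l := by
  intro l
  induction l with
  | nil => intro s _ _; simp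
  | cons c t ih =>
    intro s hnd hdis
    have hc : c ∉ s := hdis c (by simp)
    have hct : c ∉ t := (List.nodup_cons.mp hnd).1
    simp only [List.foldl_cons, PySem.Set.add_of_not_mem hc]
    rw [ih (s ++ [c]) (List.nodup_cons.mp hnd).2 ?_]
    · simp
    · intro d hd
      have hds : d ∉ s := hdis d (List.mem_cons_of_mem _ hd)
      have hdc : d ≠ c := fun h => hct (h ▸ hd)
      simp [hds, hdc]

theorem pv_ofList_append (b l : List Char) (hb : b.Nodup) :
    PySem.Set.ofList (b ++ l) = l.foldl PySem.Set.add b := by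
  rw [PySem.Set.ofList_eq_foldl, List.foldl_append]
  have h := pv_foldl_add_nodup b [] hb (by simp)
  simp only [List.nil_append] at h
  rw [h]

theorem pv_flatten_parts (il iu idg isym : Bool) (cs : String) :
    (let parts : List (List Char) := []
     let parts := if il then parts ++ [pvLower] else parts
     let parts := if iu then parts ++ [pvUpper] else parts
     let parts := if idg then parts ++ [pvDigits] else parts
     let parts := if isym then parts ++ [pvPunct] else parts
     let parts := if cs ≠ "" then parts ++ [cs.toList] else parts
     parts.flatten)
    = pvBase il iu idg isym ++ (if cs ≠ "" then cs.toList else []) := by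
  cases il <;> cases iu <;> cases idg <;> cases isym <;> by_cases hcs : cs = "" <;>
    simp [pvBase, hcs]

theorem pv_base_nodup (il iu idg isym : Bool) : (pvBase il iu idg isym).Nodup := by
  cases il <;> cases iu <;> cases idg <;> cases isym <;> decide

theorem pv_filter_base (il iu idg isym : Bool) :
    (pvBase il iu idg isym).filter (fun ch => !(PySem.Set.contains pvAMBI ch))
      = pvSafe il iu idg isym := by
  cases il <;> cases iu <;> cases idg <;> cases isym <;> decide

theorem pv_safe_nodup (il iu idg isym : Bool) : (pvSafe il iu idg isym).Nodup := by
  rw [← pv_filter_base]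
  exact (pv_base_nodup il iu idg isym).filter _

theorem pv_ofList_base (il iu idg isym : Bool) (l : List Char) :
    PySem.Set.ofList (pvBase il iu idg isym ++ l) = l.foldl PySem.Set.add (pvBase il iu idg isym) :=
  pv_ofList_append _ _ (pv_base_nodup il iu idg isym)

theorem pv_ofList_safe (il iu idg isym : Bool) (l : List Char) :
    PySem.Set.ofList (pvSafe il iu idg isym ++ l) = l.foldl PySem.Set.add (pvSafe il iu idg isym) :=
  pv_ofList_append _ _ (pv_safe_nodup il iu idg isym)

theorem pv_ofList_base_self (il iu idg isym : Bool) :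
    PySem.Set.ofList (pvBase il iu idg isym) = pvBase il iu idg isym := by
  have h := pv_ofList_base il iu idg isym []
  simpa using h

theorem pv_ofList_safe_self (il iu idg isym : Bool) :
    PySem.Set.ofList (pvSafe il iu idg isym) = pvSafe il iu idg isym := by
  have h := pv_ofList_safe il iu idg isym []
  simpa using h

theorem build_charset_spec_main (il iu idg isym : Bool) (cs : String) (ex : Bool) :
    build_charset il iu idg isym cs ex = build_charset_alt il iu idg isym cs ex := by
  simp only [build_charset, build_charset_alt]
  rw [pv_tail_fold ex, pv_flatten_parts il iu idg isym cs]
  by_cases hcs : cs = ""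
  · subst hcs
    cases ex
    · simp only [PySem.List.dedup_eq_ofList, Bool.false_and, Bool.not_false, List.filter_true,
                 Bool.false_eq_true, if_false, eq_self_iff_true, if_true, ne_eq,
                 not_true_eq_false, List.append_nil, List.foldl_nil, List.filter_nil]
      rw [pv_ofList_base_self]
      simp [pvBase, pvLowerTab, pvUpperTab, pvDigitsTab, List.append_assoc]
    · simp only [PySem.List.dedup_eq_ofList, Bool.true_and, Bool.false_eq_true, if_false,
                 eq_self_iff_true, if_true, ne_eq, not_true_eq_false, List.filter_append,
                 pv_filter_base, List.append_nil, List.foldl_nil, List.filter_nil]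
      rw [pv_ofList_safe_self]
      simp [pvSafe, List.append_assoc]
  · cases ex
    · simp only [PySem.List.dedup_eq_ofList, Bool.false_and, Bool.not_false, List.filter_true,
                 Bool.false_eq_true, if_false, eq_self_iff_true, if_true, ne_eq, hcs,
                 not_false_eq_true, List.append_nil]
      rw [pv_ofList_base]
      simp [pvBase, pvLowerTab, pvUpperTab, pvDigitsTab, List.append_assoc]
    · simp only [PySem.List.dedup_eq_ofList, Bool.true_and, Bool.false_eq_true, if_false,
                 eq_self_iff_true, if_true, ne_eq, hcs, not_false_eq_true,
                 List.filter_append, pv_filter_base, List.append_nil]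
      rw [pv_ofList_safe]
      simp [pvSafe, List.append_assoc]

-- ===== VERDICT =====
theorem build_charset_spec : Claim_equal_build_charset := by
  intro il iu idg isym cs ex _
  exact build_charset_spec_main il iu idg isym cs ex
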